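-- pv_equiv track=rewrite | github.com/usuaero/AirfoilDatabase | airfoil_db/poly_fits.py | kDecompose
-- ===== SOURCE A (Python) =====
-- def decompose_j(j, Nvec):
--     """
--     Eq. 5 in Poly Fits Derivation. Routine to decompose the j counter into
--     the n values. Can also be used as Eq. 1 with the i counter and the nhat
--     values.
--
--     inputs:
--
--         j = integer representing the column of the A matrix or the jth
--             polynomial coefficient
--         Nvec = list of integers representing the polynomial order of the
--             independent variables
--
--     returns:
--
--         n = list of integer values representing the independent variables'
--             exponents for the jth term in the multidimensional polynomial
--             function (Eq. 2)
--     """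
--     # calculate V
--     V = len(Nvec)
--     # initialize n values to nothing
--     n = [[]]*V
--     # loop through the n values that need to be solved, starting at the highest and working down
--     for v in range(V,0,-1):
--         # initialize the denomenator product series to 1
--         denom = 1
--         # loop through the w values needed for the product series
--         for w in range(v+1,V+1):
--             # multiply on the terms for the denomenator product series
--             denom *= Nvec[w-1] + 1
--         # initialize the summation variable to 0
--         summ = 0
--         # loop through the u values necessary for the summation
--         for u in range(v+1,V+1):
--             # initialize the product series variable inside the summation to 1
--             prod = 1
--             # loop through the s values needed for the product series that is inside the summation
--             for s in range(u+1,V+1):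
--                 # multiply on the term for the product series that is inside of the summation
--                 prod *= Nvec[s-1] + 1
--             # add on the needed term to the summation series
--             summ += n[u-1] * prod
--         # finally calculate the n value cooresponding to this v
--         n[v-1] = int(round( ((j-summ)/denom)%(Nvec[v-1]+1) ))
--     return n
--
-- def calcJ(Nvec):
--     J = 1
--     for n in Nvec:
--         J *= n + 1
--     return J
--
-- def kDecompose(k, V):
--     t = 1
--     ###################################################
--     ## find the category
--     c = 0
--     vals = [0] * V
--     while k > t:
--         c += 1
--         m = [c] * (V-1)
--         vals[0] = calcJ(m)
--         for j in range(V-1):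
--             m[j] -= 1
--             vals[j+1] = calcJ(m)
--         t += sum(vals)
--     if c == 0:
--         return [0]*V
--     ####################################################
--     ## find the subcategory
--     for sc in range(V-1,-1,-1):
--         t -= vals[sc]
--         if k > t:
--             break
--     ####################################################
--     ## determine n
--     # initialize n
--     n = [None]*V
--     n[sc] = c
--     # create mx based on the sc, then decompose to get m
--     mx = [c]*(V-1)
--     for i in range(sc):
--         mx[i] -= 1
--     m = decompose_j(k-t-1, mx)
--     # set m values into n and return
--     j = -1
--     for i in range(V):
--         if i != sc:
--             j += 1
--             n[i] = m[j]
--     return n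
-- ===== SOURCE B (Python) =====
-- def kDecompose(k, V):
--     # zeros category
--     if k <= 1:
--         return [0] * V
--     # category: least c >= 1 with (c+1)**V >= k, found by binary search on [1, k-1]
--     # (the cumulative count of indices with max exponent <= c is (c+1)**V)
--     lo, hi = 1, k - 1
--     while lo < hi:
--         mid = (lo + hi) // 2
--         if (mid + 1) ** V >= k:
--             hi = mid
--         else:
--             lo = mid + 1
--     c = lo
--     # subcategory: scan sc from V-1 down, subtracting the closed-form block size
--     # c**sc * (c+1)**(V-1-sc) instead of maintaining a table of products
--     t = (c + 1) ** V
--     sc = V - 1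
--     while True:
--         t -= c ** sc * (c + 1) ** (V - 1 - sc)
--         if k > t or sc == 0:
--             break
--         sc -= 1
--     # remaining exponents: mixed-radix digits of k-t-1 (radix c at positions < sc,
--     # radix c+1 at positions >= sc), extracted least-significant-digit first
--     r = k - t - 1
--     m = []
--     for i in range(V - 2, -1, -1):
--         base = c if i < sc else c + 1
--         m.append(r % base)
--         r //= base
--     m.reverse()
--     return m[:sc] + [c] + m[sc:]
-- ===== Notes on version B (the rewrite author's own statement) =====
-- stated objective: faster
-- what changed: B replaces A's unit-step category scan (which rebuilds a table of V products per step via calcJ) by a binary search for the least c with (c+1)**V >= k using the closed-form cumulative count, replaces the vals table by closed-form powers in the subcategory scan, and replaces decompose_j's O(V^2) nested product-series decomposition by a single least-significant-first divmod digit loop.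
import Mathlib
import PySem

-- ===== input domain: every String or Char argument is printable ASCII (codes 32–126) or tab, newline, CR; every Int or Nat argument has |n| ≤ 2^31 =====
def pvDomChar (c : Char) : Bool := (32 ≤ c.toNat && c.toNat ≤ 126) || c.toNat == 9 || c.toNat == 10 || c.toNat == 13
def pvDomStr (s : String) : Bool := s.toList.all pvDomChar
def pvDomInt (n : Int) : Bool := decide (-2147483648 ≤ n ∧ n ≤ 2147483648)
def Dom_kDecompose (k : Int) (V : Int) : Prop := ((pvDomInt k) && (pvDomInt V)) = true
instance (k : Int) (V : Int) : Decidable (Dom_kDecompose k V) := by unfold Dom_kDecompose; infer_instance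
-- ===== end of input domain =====

-- B replaces A's unit-step category scan, product table and nested-series decomposition by a
-- binary search on the closed-form count (c+1)^V, closed-form powers and a divmod digit loop
-- (objective: faster).

-- ===== PORT A =====

def calcJ (Nvec : List Int) : Int := Nvec.foldl (fun J n => J * (n + 1)) 1

-- decompose_j's outer loop 'for v in range(V,0,-1)', ported as recursion on v
-- (pattern v+1 is Python's v).  Python initialises n to [[]]*V but every entry read has
-- already been written, so the Int port initialises with 0.  Python computes
-- int(round(((j-summ)/denom) % M)) with float true division; in every call this file's
-- kDecompose makes, denom divides j-summ exactly and all values fit a double, so it equals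
-- floor division then integer mod: ported as PySem.Int.floordiv / mod.  All list indices
-- are in range, so getD is exact.
def djLoop (j : Int) (Nvec : List Int) (V : Nat) : Nat → List Int → List Int
  | 0, n => n
  | v+1, n =>
    let denom := (List.range' (v+2) (V - (v+1))).foldl (fun d w => d * (Nvec.getD (w-1) 0 + 1)) 1
    let summ := (List.range' (v+2) (V - (v+1))).foldl (fun s u =>
        let prod := (List.range' (u+1) (V - u)).foldl (fun p s' => p * (Nvec.getD (s'-1) 0 + 1)) 1
        s + n.getD (u-1) 0 * prod) 0
    djLoop j Nvec V v
      (n.set v (PySem.Int.mod (PySem.Int.floordiv (j - summ) denom) (Nvec.getD v 0 + 1)))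

def decompose_j (j : Int) (Nvec : List Int) : List Int :=
  djLoop j Nvec Nvec.length Nvec.length (List.replicate Nvec.length 0)

-- the 'while k > t' category loop; fuel k.toNat+1 bounds the iteration count
-- (each pass increases t by at least 1, and the loop runs only while k > t ≥ c+1);
-- it is only a totality guard
def kdLoop (k : Int) (V : Nat) : Nat → Int → Int → List Int → Int × Int × List Int
  | 0, c, t, vals => (c, t, vals)
  | fuel+1, c, t, vals =>
    if k > t then
      let c' := c + 1
      let m0 := List.replicate (V-1) c'
      let vals0 := vals.set 0 (calcJ m0)
      let p := (List.range (V-1)).foldl (fun (mv : List Int × List Int) j =>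
          let m' := mv.1.set j (mv.1.getD j 0 - 1)
          (m', mv.2.set (j+1) (calcJ m'))) (m0, vals0)
      kdLoop k V fuel c' (t + p.2.sum) p.2
    else (c, t, vals)

-- 'for sc in range(V-1,-1,-1): t -= vals[sc]; if k > t: break', recursion on sc
def kdScLoop (k : Int) (vals : List Int) : Nat → Int → Nat × Int
  | 0, t => (0, t - vals.getD 0 0)
  | sc+1, t =>
    let t' := t - vals.getD (sc+1) 0
    if k > t' then (sc+1, t') else kdScLoop k vals sc t'

def kDecompose (k : Int) (V : Int) : List Int :=
  let n := V.toNat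
  let r := kdLoop k n (k.toNat + 1) 0 1 (List.replicate n 0)
  let c := r.1
  if c = 0 then List.replicate n 0
  else
    let s := kdScLoop k r.2.2 (n - 1) r.2.1
    let sc := s.1
    let mx := (List.range sc).foldl (fun m i => m.set i (m.getD i 0 - 1)) (List.replicate (n-1) c)
    let m := decompose_j (k - s.2 - 1) mx
    ((List.range n).foldl (fun (jn : Int × List Int) i =>
        if i ≠ sc then (jn.1 + 1, jn.2.set i (m.getD (jn.1 + 1).toNat 0)) else jn)
      (-1, (List.replicate n 0).set sc c)).2

-- ===== PORT B =====

-- binary search for the least c in [lo,hi] with (c+1)^V ≥ k; the fuel is only a totality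
-- guard (the interval shrinks every pass)
def bsearchC (k : Int) (V : Nat) : Nat → Int → Int → Int
  | 0, lo, _ => lo
  | fuel+1, lo, hi =>
    if lo < hi then
      let mid := PySem.Int.floordiv (lo + hi) 2
      if k ≤ (mid + 1) ^ V then bsearchC k V fuel lo mid else bsearchC k V fuel (mid + 1) hi
    else lo

-- 'while True: t -= c**sc * (c+1)**(V-1-sc); if k > t or sc == 0: break; sc -= 1'
def scanSc (k c : Int) (V : Nat) : Nat → Int → Nat × Int
  | 0, t => (0, t - c ^ (0:Nat) * (c+1) ^ (V-1))
  | sc+1, t =>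
    let t' := t - c ^ (sc+1) * (c+1) ^ (V-1-(sc+1))
    if k > t' then (sc+1, t') else scanSc k c V sc t'

-- 'for i in range(V-2,-1,-1): m.append(r % base); r //= base', recursion on i
def digLoop (c : Int) (sc : Nat) : Nat → Int → List Int → List Int
  | 0, _, m => m
  | i+1, r, m =>
    let base := if i < sc then c else c + 1
    digLoop c sc i (PySem.Int.floordiv r base) (m ++ [PySem.Int.mod r base])

def kDecompose_alt (k : Int) (V : Int) : List Int :=
  if k ≤ 1 then List.replicate V.toNat 0
  else
    let n := V.toNat
    let c := bsearchC k n k.toNat 1 (k - 1)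
    let s := scanSc k c n (n - 1) ((c + 1) ^ n)
    let sc := s.1
    let m := (digLoop c sc (n - 1) (k - s.2 - 1) []).reverse
    m.take sc ++ [c] ++ m.drop sc

-- ===== PRECONDITION & SPEC =====
-- Pre_ excludes exactly the inputs with k > 1 and V ≤ 0, on which A raises IndexError
-- (it indexes vals[0] into an empty list); A returns on every other input.
def Pre_kDecompose (k : Int) (V : Int) : Prop := k ≤ 1 ∨ 1 ≤ V
instance (k : Int) (V : Int) : Decidable (Pre_kDecompose k V) := by unfold Pre_kDecompose; infer_instance
def pvWitness_kDecompose : Int × Int := (5, 2)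

def Spec_kDecompose (k : Int) (V : Int) (out : List Int) : Prop := out = kDecompose_alt k V
instance (k : Int) (V : Int) (out : List Int) : Decidable (Spec_kDecompose k V out) := by unfold Spec_kDecompose; infer_instance

-- ===== CLAIM (what is proved, stated in full; the proofs are below) =====
def Claim_equal_kDecompose : Prop := ∀ (k : Int) (V : Int), Dom_kDecompose k V → Pre_kDecompose k V → Spec_kDecompose k V (kDecompose k V)
-- ===== LEMMAS AND PROOFS =====

lemma foldl_mul_map {α : Type} (g : α → Int) (l : List α) (x : Int) :
    l.foldl (fun d w => d * g w) x = x * (l.map g).prod := by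
  induction l generalizing x with
  | nil => simp
  | cons a l ih => simp [List.foldl_cons, ih, mul_assoc]

def sufP (Nvec : List Int) (i : Nat) : Int := ((Nvec.drop i).map (· + 1)).prod

def dgt (j : Int) (Nvec : List Int) (i : Nat) : Int :=
  (j / sufP Nvec (i+1)) % (Nvec.getD i 0 + 1)

lemma sufP_pos (Nvec : List Int) (hpos : ∀ x ∈ Nvec, 0 ≤ x) (i : Nat) : 0 < sufP Nvec i := by
  apply List.prod_pos
  intro a ha
  simp only [List.mem_map] at ha
  obtain ⟨x, hx, rfl⟩ := ha
  have := hpos x (List.mem_of_mem_drop hx)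
  omega

lemma sufP_length (Nvec : List Int) : sufP Nvec Nvec.length = 1 := by
  simp [sufP]

lemma sufP_succ (Nvec : List Int) (i : Nat) (h : i < Nvec.length) :
    sufP Nvec i = (Nvec.getD i 0 + 1) * sufP Nvec (i+1) := by
  rw [sufP, List.drop_eq_getElem_cons h, List.map_cons, List.prod_cons, List.getD_eq_getElem _ _ h]
  rfl

lemma map_getD_range' (Nvec : List Int) :
    ∀ cnt a, a + cnt = Nvec.length →
      (List.range' a cnt).map (fun i => Nvec.getD i 0) = Nvec.drop a := by
  intro cnt
  induction cnt with
  | zero => intro a h; rw [show a = Nvec.length by omega]; simp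
  | succ cnt ih =>
    intro a h
    rw [List.range'_succ, List.map_cons, ih (a+1) (by omega),
      List.drop_eq_getElem_cons (by omega : a < Nvec.length),
      List.getD_eq_getElem _ _ (by omega : a < Nvec.length)]

lemma prodFold (Nvec : List Int) (a cnt : Nat) (h : a + cnt = Nvec.length) :
    (List.range' (a+1) cnt).foldl (fun d w => d * (Nvec.getD (w-1) 0 + 1)) 1 = sufP Nvec a := by
  rw [foldl_mul_map, one_mul]
  have h1 : (List.range' (a+1) cnt).map (fun w => Nvec.getD (w-1) 0 + 1)
      = (List.range' a cnt).map (fun i => Nvec.getD i 0 + 1) := by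
    rw [List.range'_eq_map_range, List.range'_eq_map_range, List.map_map, List.map_map]
    apply List.map_congr_left
    intro i _
    simp only [Function.comp_apply]
    congr 2
    omega
  rw [h1]
  have h2 : (List.range' a cnt).map (fun i => Nvec.getD i 0 + 1)
      = ((List.range' a cnt).map (fun i => Nvec.getD i 0)).map (· + 1) := by
    rw [List.map_map]; rfl
  rw [h2, map_getD_range' Nvec cnt a h]
  rfl

lemma emod_mul_split (j a b : Int) (ha : 0 < a) (hb : 0 < b) :
    j % (b * a) = ((j / a) % b) * a + j % a := by
  have hq : j = (j / a) * a + j % a := by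
    have h1 := Int.mul_ediv_add_emod j a
    have h2 : a * (j / a) = (j / a) * a := mul_comm _ _
    linarith
  have hq2 : j / a = (j / a / b) * b + (j / a) % b := by
    have h1 := Int.mul_ediv_add_emod (j / a) b
    have h2 : b * (j / a / b) = (j / a / b) * b := mul_comm _ _
    linarith
  have hX0 : 0 ≤ ((j / a) % b) * a + j % a := by
    have := Int.emod_nonneg (j / a) (by omega : b ≠ 0)
    have := Int.emod_nonneg j (by omega : a ≠ 0)
    positivity
  have hXlt : ((j / a) % b) * a + j % a < b * a := by
    have h1 : (j / a) % b ≤ b - 1 := by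
      have := Int.emod_lt_of_pos (j / a) hb; omega
    have h2 : j % a < a := Int.emod_lt_of_pos j ha
    nlinarith
  have hdecomp : j = (((j / a) % b) * a + j % a) + (b * a) * (j / a / b) := by
    calc j = (j / a) * a + j % a := hq
    _ = ((j / a / b) * b + (j / a) % b) * a + j % a := by rw [← hq2]
    _ = (((j / a) % b) * a + j % a) + (b * a) * (j / a / b) := by ring
  conv_lhs => rw [hdecomp]
  rw [Int.add_mul_emod_self_left, Int.emod_eq_of_lt hX0 hXlt]

lemma getD_nonneg (Nvec : List Int) (hpos : ∀ x ∈ Nvec, 0 ≤ x) (p : Nat)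
    (hp : p < Nvec.length) : 0 ≤ Nvec.getD p 0 := by
  rw [List.getD_eq_getElem _ _ hp]
  exact hpos _ (List.getElem_mem _)

lemma sumDigits (j : Int) (Nvec : List Int) (hpos : ∀ x ∈ Nvec, 0 ≤ x) :
    ∀ cnt p, p + cnt = Nvec.length →
      ((List.range' p cnt).map (fun q => dgt j Nvec q * sufP Nvec (q+1))).sum
        = j % sufP Nvec p := by
  intro cnt
  induction cnt with
  | zero =>
    intro p h
    rw [show p = Nvec.length by omega, sufP_length]
    simp
  | succ cnt ih =>
    intro p h
    rw [List.range'_succ, List.map_cons, List.sum_cons, ih (p+1) (by omega)]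
    rw [sufP_succ Nvec p (by omega), dgt]
    have hB := getD_nonneg Nvec hpos p (by omega)
    exact (emod_mul_split j (sufP Nvec (p+1)) (Nvec.getD p 0 + 1)
      (sufP_pos Nvec hpos (p+1)) (by omega)).symm

lemma set_map_range {α : Type} (f : Nat → α) (n i : Nat) (x : α) :
    ((List.range n).map f).set i x = (List.range n).map (fun q => if q = i then x else f q) := by
  apply List.ext_getElem (by simp)
  intro p hp hq
  simp only [List.getElem_set, List.getElem_map, List.getElem_range]
  by_cases hpi : i = p
  · subst hpi; simp
  · rw [if_neg hpi, if_neg (fun h => hpi h.symm)]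

lemma djLoop_spec (j : Int) (Nvec : List Int) (hpos : ∀ x ∈ Nvec, 0 ≤ x) :
    ∀ v, v ≤ Nvec.length →
      djLoop j Nvec Nvec.length v
          ((List.range Nvec.length).map (fun i => if i < v then 0 else dgt j Nvec i))
        = (List.range Nvec.length).map (dgt j Nvec) := by
  intro v
  induction v with
  | zero =>
    intro _
    show djLoop _ _ _ 0 _ = _
    rw [djLoop]
    apply List.map_congr_left
    intro i _
    simp
  | succ v ih =>
    intro hv
    set V := Nvec.length with hV
    have hstep : djLoop j Nvec V (v+1)
        ((List.range V).map (fun i => if i < v+1 then 0 else dgt j Nvec i))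
      = djLoop j Nvec V v
        ((List.range V).map (fun i => if i < v then 0 else dgt j Nvec i)) := by
      rw [djLoop]
      congr 1
      -- the state after writing position v
      have hdenom : (List.range' (v+2) (V - (v+1))).foldl
          (fun d w => d * (Nvec.getD (w-1) 0 + 1)) 1 = sufP Nvec (v+1) := by
        exact prodFold Nvec (v+1) (V - (v+1)) (by omega)
      have hsumm : (List.range' (v+2) (V - (v+1))).foldl (fun s u =>
            let prod := (List.range' (u+1) (V - u)).foldl
              (fun p s' => p * (Nvec.getD (s'-1) 0 + 1)) 1
            s + ((List.range V).map (fun i => if i < v+1 then 0 else dgt j Nvec i)).getD (u-1) 0 * prod) 0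
          = j % sufP Nvec (v+1) := by
        refine (PySem.List.foldl_congr_mem'
            (g := fun s u => s + dgt j Nvec (u-1) * sufP Nvec u) _ _ 0 ?_).trans ?_
        · intro u hu s
          have hmem := List.mem_range'_1.mp hu
          have h1 : ((List.range V).map (fun i => if i < v+1 then 0 else dgt j Nvec i)).getD (u-1) 0
              = dgt j Nvec (u-1) := by
            rw [PySem.List.getD_map_range _ _ _ _ (by omega : u - 1 < V)]
            rw [if_neg (by omega)]
          simp only [h1, prodFold Nvec u (V - u) (by omega)]
        · rw [PySem.List.foldl_add, zero_add]
          have hshift : (List.range' (v+2) (V - (v+1))).map (fun u => dgt j Nvec (u-1) * sufP Nvec u)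
              = (List.range' (v+1) (V - (v+1))).map (fun q => dgt j Nvec q * sufP Nvec (q+1)) := by
            rw [List.range'_eq_map_range, List.range'_eq_map_range, List.map_map, List.map_map]
            apply List.map_congr_left
            intro i _
            simp only [Function.comp_apply]
            congr 2 <;> omega
          rw [hshift, sumDigits j Nvec hpos (V - (v+1)) (v+1) (by omega)]
      rw [hdenom, hsumm]
      have hD : 0 < sufP Nvec (v+1) := sufP_pos Nvec hpos (v+1)
      have hB : 0 < Nvec.getD v 0 + 1 := by
        have := getD_nonneg Nvec hpos v (by omega); omega
      rw [PySem.Int.floordiv_eq_ediv_of_pos hD, PySem.Int.mod_eq_emod_of_pos hB]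
      have hsub : j - j % sufP Nvec (v+1) = sufP Nvec (v+1) * (j / sufP Nvec (v+1)) := by
        have := Int.mul_ediv_add_emod j (sufP Nvec (v+1)); linarith
      rw [hsub, Int.mul_ediv_cancel_left _ (ne_of_gt hD)]
      rw [set_map_range]
      apply List.map_congr_left
      intro q _
      by_cases h1 : q = v
      · subst h1; simp [dgt]
      · by_cases h2 : q < v
        · rw [if_neg h1, if_pos (by omega), if_pos h2]
        · rw [if_neg h1, if_neg (by omega), if_neg h2]
    rw [hstep, ih (by omega)]

lemma decompose_j_spec (j : Int) (Nvec : List Int) (hpos : ∀ x ∈ Nvec, 0 ≤ x) :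
    decompose_j j Nvec = (List.range Nvec.length).map (dgt j Nvec) := by
  rw [decompose_j, show List.replicate Nvec.length (0:Int)
      = (List.range Nvec.length).map (fun i => if i < Nvec.length then 0 else dgt j Nvec i) from ?_,
    djLoop_spec j Nvec hpos Nvec.length le_rfl]
  calc List.replicate Nvec.length (0:Int)
      = (List.range Nvec.length).map (fun _ => 0) := by simp [List.map_const']
    _ = _ := by
        apply List.map_congr_left
        intro i hi
        rw [if_pos (List.mem_range.mp hi)]

lemma calcJ_eq (l : List Int) : calcJ l = (l.map (· + 1)).prod := by
  rw [calcJ, foldl_mul_map, one_mul]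

lemma calcJ_repl (a b : Nat) (x y : Int) :
    calcJ (List.replicate a x ++ List.replicate b y) = (x+1)^a * (y+1)^b := by
  simp [calcJ_eq, List.prod_replicate]

def geomVals (c : Int) (n : Nat) : List Int :=
  (List.range n).map (fun i => c^i * (c+1)^(n-1-i))

lemma setStep (c : Int) (p j : Nat) (hj : j < p) :
    (List.replicate j (c-1) ++ List.replicate (p-j) c).set j
        ((List.replicate j (c-1) ++ List.replicate (p-j) c).getD j 0 - 1)
      = List.replicate (j+1) (c-1) ++ List.replicate (p-(j+1)) c := by
  have hlen : (List.replicate j (c-1) ++ List.replicate (p-j) c).length = p := by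
    simp; omega
  have hget : (List.replicate j (c-1) ++ List.replicate (p-j) c).getD j 0 = c := by
    rw [List.getD_eq_getElem _ _ (by omega)]
    rw [List.getElem_append_right (by simp)]
    simp
  rw [hget]
  apply List.ext_getElem (by simp; omega)
  intro q hq hq'
  simp only [List.getElem_set, List.getElem_append, List.length_replicate,
    List.getElem_replicate] at *
  split_ifs <;> omega

lemma kdBodyAux (c : Int) (n : Nat) (hn : n ≠ 0) (vals : List Int) (hlen : vals.length = n) :
    ∀ jn, jn ≤ n - 1 →
      (List.range jn).foldl (fun (mv : List Int × List Int) j =>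
          let m' := mv.1.set j (mv.1.getD j 0 - 1)
          (m', mv.2.set (j+1) (calcJ m')))
        (List.replicate (n-1) c, vals.set 0 (calcJ (List.replicate (n-1) c)))
      = (List.replicate jn (c-1) ++ List.replicate ((n-1)-jn) c,
         (List.range (jn+1)).map (fun i => c^i * (c+1)^(n-1-i)) ++ vals.drop (jn+1)) := by
  intro jn
  induction jn with
  | zero =>
    intro _
    simp only [List.range_zero, List.foldl_nil, List.replicate_zero, List.nil_append,
      Nat.sub_zero]
    simp only [Prod.mk.injEq]
    refine ⟨trivial, ?_⟩
    match vals, hn, hlen with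
    | a :: tl, _, _ =>
      simp only [List.range_succ, List.range_zero, List.nil_append, List.map_cons,
        List.map_nil, List.set_cons_zero, List.drop_succ_cons, List.drop_zero,
        List.singleton_append, List.cons.injEq]
      refine ⟨?_, trivial⟩
      rw [calcJ_eq]
      simp [List.prod_replicate]
  | succ jn ih =>
    intro hjn
    rw [List.range_succ, List.foldl_append, ih (by omega), List.foldl_cons, List.foldl_nil]
    simp only
    rw [setStep c (n-1) jn (by omega)]
    simp only [Prod.mk.injEq]
    refine ⟨trivial, ?_⟩
    have hc : calcJ (List.replicate (jn+1) (c-1) ++ List.replicate (n-1-(jn+1)) c)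
        = c^(jn+1) * (c+1)^(n-1-(jn+1)) := by
      rw [calcJ_repl]
      norm_num
    rw [hc, List.set_append, if_neg (by simp)]
    have hlm : (List.map (fun i => c^i * (c+1)^(n-1-i)) (List.range (jn+1))).length = jn + 1 := by
      simp
    rw [hlm, Nat.sub_self,
      List.drop_eq_getElem_cons (by omega : jn + 1 < vals.length), List.set_cons_zero]
    rw [List.range_succ (n := jn + 1), List.map_append, List.append_assoc]
    simp only [List.map_cons, List.map_nil, List.singleton_append]

lemma geomVals_sum (c : Int) : ∀ n : Nat, (geomVals c n).sum = (c+1)^n - c^n := by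
  intro n
  induction n with
  | zero => simp [geomVals]
  | succ n ih =>
    rw [geomVals, List.range_succ, List.map_append, List.sum_append]
    have h1 : (List.range n).map (fun i => c^i * (c+1)^(n+1-1-i))
        = (List.range n).map (fun i => (c+1) * (c^i * (c+1)^(n-1-i))) := by
      apply List.map_congr_left
      intro i hi
      have hi' := List.mem_range.mp hi
      rw [show n+1-1-i = (n-1-i)+1 by omega, pow_succ]
      ring
    rw [h1, List.sum_map_mul_left]
    have h2 : ((List.range n).map fun i => c^i * (c+1)^(n-1-i)).sum = (c+1)^n - c^n := ih
    rw [h2]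
    simp only [List.map_cons, List.map_nil, List.sum_cons, List.sum_nil]
    have : n+1-1-n = 0 := by omega
    rw [this]
    ring

lemma kdLoop_spec (k : Int) (n : Nat) (hn : n ≠ 0) :
    ∀ fuel (c0 : Int) (vals0 : List Int), 0 ≤ c0 → vals0.length = n →
      (∀ c', 0 ≤ c' → c' < c0 → (c'+1)^n < k) → (k - c0).toNat ≤ fuel →
      ∃ c vals, kdLoop k n fuel c0 ((c0+1)^n) vals0 = (c, (c+1)^n, vals) ∧ c0 ≤ c ∧
        k ≤ (c+1)^n ∧ (∀ c', 0 ≤ c' → c' < c → (c'+1)^n < k) ∧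
        (c0 < c → vals = geomVals c n) ∧ (c = c0 → vals = vals0) ∧ vals.length = n := by
  intro fuel
  induction fuel with
  | zero =>
    intro c0 vals0 hc0 hlen hlow hfuel
    have hk : k ≤ c0 := by omega
    have hle : c0 + 1 ≤ (c0+1)^n := le_self_pow₀ (by omega) hn
    refine ⟨c0, vals0, ?_, le_rfl, by omega, hlow, by omega, fun _ => rfl, hlen⟩
    rfl
  | succ fuel ih =>
    intro c0 vals0 hc0 hlen hlow hfuel
    by_cases hkt : k > (c0+1)^n
    · rw [kdLoop, if_pos hkt]
      simp only
      have hbody := kdBodyAux (c0+1) n hn vals0 hlen (n-1) le_rfl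
      have hrepl : List.replicate ((n-1)-(n-1)) (c0+1) = ([] : List Int) := by
        simp
      rw [hbody]
      simp only
      have hgeom : (List.range ((n-1)+1)).map (fun i => (c0+1)^i * (c0+1+1)^(n-1-i))
            ++ vals0.drop ((n-1)+1) = geomVals (c0+1) n := by
        rw [show (n-1)+1 = n by omega, List.drop_of_length_le (by omega), List.append_nil]
        rfl
      rw [hgeom, geomVals_sum]
      have hstep : (c0+1)^n + ((c0+1+1)^n - (c0+1)^n) = ((c0+1)+1)^n := by ring
      rw [hstep]
      have hlow' : ∀ c', 0 ≤ c' → c' < c0 + 1 → (c'+1)^n < k := by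
        intro c' h1 h2
        by_cases h3 : c' < c0
        · exact hlow c' h1 h3
        · have : c' = c0 := by omega
          subst this; omega
      have hle : c0 + 1 ≤ (c0+1)^n := le_self_pow₀ (by omega) hn
      obtain ⟨c, vals, heq, hge, hub, hlw, hg, hbase, hl⟩ :=
        ih (c0+1) (geomVals (c0+1) n) (by omega) (by simp [geomVals]) hlow' (by omega)
      refine ⟨c, vals, heq, by omega, hub, hlw, ?_, ?_, hl⟩
      · intro _
        by_cases hcc : c = c0 + 1
        · rw [hbase hcc, hcc]
        · exact hg (by omega)
      · intro h; omega
    · rw [kdLoop, if_neg hkt]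
      exact ⟨c0, vals0, rfl, le_rfl, by omega, hlow, by omega, fun _ => rfl, hlen⟩

lemma scLoop_eq (k c : Int) (n : Nat) :
    ∀ sc, sc < n → ∀ t, kdScLoop k (geomVals c n) sc t = scanSc k c n sc t := by
  intro sc
  induction sc with
  | zero =>
    intro _ t
    rw [kdScLoop, scanSc, geomVals,
      PySem.List.getD_map_range _ _ _ _ (by omega : 0 < n)]
    norm_num
  | succ sc ih =>
    intro hsc t
    rw [kdScLoop, scanSc, geomVals,
      PySem.List.getD_map_range _ _ _ _ (by omega : sc + 1 < n)]
    split
    · rfl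
    · exact ih (by omega) _

lemma scanSc_fst_le (k c : Int) (n : Nat) : ∀ sc t, (scanSc k c n sc t).1 ≤ sc := by
  intro sc
  induction sc with
  | zero => intro t; rw [scanSc]
  | succ sc ih =>
    intro t
    rw [scanSc]
    split
    · simp
    · exact le_trans (ih _) (by omega)

lemma mxFold (c : Int) (p : Nat) :
    ∀ sc, sc ≤ p →
      (List.range sc).foldl (fun m i => m.set i (m.getD i 0 - 1)) (List.replicate p c)
        = List.replicate sc (c-1) ++ List.replicate (p - sc) c := by
  intro sc
  induction sc with
  | zero => intro _; simp
  | succ sc ih =>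
    intro hsc
    rw [List.range_succ, List.foldl_append, ih (by omega), List.foldl_cons, List.foldl_nil,
      setStep c p sc (by omega)]

lemma digLoop_spec (j c : Int) (hc : 1 ≤ c) (n sc : Nat) (hsc : sc ≤ n - 1) (hn : n ≠ 0) :
    ∀ i, i ≤ n - 1 → ∀ acc,
      digLoop c sc i (j / sufP (List.replicate sc (c-1) ++ List.replicate ((n-1) - sc) c) i) acc
        = acc ++ (List.range i).reverse.map
            (dgt j (List.replicate sc (c-1) ++ List.replicate ((n-1) - sc) c)) := by
  set mx := List.replicate sc (c-1) ++ List.replicate ((n-1) - sc) c with hmx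
  have hpos : ∀ x ∈ mx, 0 ≤ x := by
    intro x hx
    rw [hmx] at hx
    rcases List.mem_append.mp hx with h | h <;>
      · have := List.eq_of_mem_replicate h; omega
  have hlen : mx.length = n - 1 := by simp [hmx]; omega
  intro i
  induction i with
  | zero => intro _ acc; simp [digLoop]
  | succ i ih =>
    intro hi acc
    rw [digLoop]
    have hbase : (if i < sc then c else c + 1) = mx.getD i 0 + 1 := by
      rw [List.getD_eq_getElem _ _ (by omega : i < mx.length)]
      simp only [hmx, List.getElem_append, List.length_replicate, List.getElem_replicate]
      split_ifs <;> omega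
    have hBpos : 0 < mx.getD i 0 + 1 := by
      have := getD_nonneg mx hpos i (by omega); omega
    have hSpos := sufP_pos mx hpos (i+1)
    rw [hbase, PySem.Int.floordiv_eq_ediv_of_pos hBpos, PySem.Int.mod_eq_emod_of_pos hBpos]
    have hdiv : j / sufP mx (i+1) / (mx.getD i 0 + 1) = j / sufP mx i := by
      rw [Int.ediv_ediv_of_nonneg (by omega : (0:Int) ≤ sufP mx (i+1)), mul_comm,
        ← sufP_succ mx i (by omega)]
    rw [hdiv, ih (by omega)]
    rw [List.range_succ, List.reverse_append, List.map_append]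
    simp [dgt, List.append_assoc]

lemma bsearchC_spec (k : Int) (n : Nat) :
    ∀ fuel (lo hi : Int), 1 ≤ lo → lo ≤ hi →
      (∀ c', 1 ≤ c' → c' < lo → (c'+1)^n < k) → k ≤ (hi+1)^n →
      (hi - lo).toNat < fuel →
      (1 ≤ bsearchC k n fuel lo hi ∧ k ≤ (bsearchC k n fuel lo hi + 1)^n ∧
        ∀ c', 1 ≤ c' → c' < bsearchC k n fuel lo hi → (c'+1)^n < k) := by
  intro fuel
  induction fuel with
  | zero => intro lo hi h1 h2 _ _ h5; omega
  | succ fuel ih =>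
    intro lo hi h1 h2 hlow hhi hfuel
    by_cases hlh : lo < hi
    · rw [bsearchC, if_pos hlh]
      have hmid := PySem.Int.floordiv_two_mid_bounds (by omega : lo ≤ hi)
      have hmidlt : PySem.Int.floordiv (lo + hi) 2 < hi := by
        rw [PySem.Int.floordiv_lt_iff_lt_mul (by omega)]
        omega
      set mid := PySem.Int.floordiv (lo + hi) 2 with hm
      by_cases hk : k ≤ (mid + 1) ^ n
      · rw [if_pos hk]
        exact ih lo mid h1 (by omega) hlow hk (by omega)
      · rw [if_neg hk]
        refine ih (mid+1) hi (by omega) (by omega) ?_ hhi (by omega)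
        intro c' hc1 hc2
        by_cases h3 : c' < lo
        · exact hlow c' hc1 h3
        · calc (c'+1)^n ≤ (mid+1)^n := by
                apply pow_le_pow_left₀ (by omega) (by omega)
          _ < k := by omega
    · rw [bsearchC, if_neg hlh]
      have : lo = hi := by omega
      subst this
      exact ⟨h1, hhi, hlow⟩

lemma fill_spec (m : List Int) (c : Int) (n sc : Nat) (hsc : sc < n) (hm : m.length = n - 1) :
    ((List.range n).foldl (fun (jn : Int × List Int) i =>
        if i ≠ sc then (jn.1 + 1, jn.2.set i (m.getD (jn.1 + 1).toNat 0)) else jn)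
      (-1, (List.replicate n 0).set sc c)).2 = m.take sc ++ [c] ++ m.drop sc := by
  set N0 := (List.replicate n (0:Int)).set sc c with hN0
  set T := m.take sc ++ [c] ++ m.drop sc with hT
  have hTlen : T.length = n := by
    rw [hT]; simp; omega
  have hN0len : N0.length = n := by rw [hN0]; simp
  have hTget : ∀ q, q < n →
      T[q]? = if q < sc then m[q]? else if q = sc then some c else m[q-1]? := by
    intro q hq
    rw [hT]
    simp only [List.getElem?_append, List.getElem?_take, List.getElem?_drop,
      List.length_append, List.length_take, List.length_cons, List.length_nil]
    simp only [List.getElem?_cons, List.getElem?_nil]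
    split_ifs <;> first
      | rfl
      | omega
      | (rw [show sc + (q - (min sc m.length + 1)) = q - 1 by omega])
  have hN0get : ∀ q, q < n → N0[q]? = some (if q = sc then c else 0) := by
    intro q hq
    rw [hN0]
    simp only [List.getElem?_set, List.length_replicate, List.getElem?_replicate]
    split_ifs <;> first | rfl | omega
  have haux : ∀ i0, i0 ≤ n →
      (List.range i0).foldl (fun (jn : Int × List Int) i =>
          if i ≠ sc then (jn.1 + 1, jn.2.set i (m.getD (jn.1 + 1).toNat 0)) else jn)
        (-1, N0)
      = ((if i0 ≤ sc then (i0:Int) - 1 else (i0:Int) - 2), T.take i0 ++ N0.drop i0) := by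
    intro i0
    induction i0 with
    | zero => simp
    | succ i0 ih =>
      intro hi0
      rw [List.range_succ, List.foldl_append, ih (by omega), List.foldl_cons, List.foldl_nil]
      have hdropN0 : N0.drop i0 = (if i0 = sc then c else 0) :: N0.drop (i0+1) := by
        rw [List.drop_eq_getElem_cons (by omega : i0 < N0.length)]
        have := hN0get i0 (by omega)
        rw [List.getElem?_eq_getElem (by omega : i0 < N0.length)] at this
        rw [Option.some_inj.mp this]
      have hsetstep : ∀ v : Int,
          (T.take i0 ++ N0.drop i0).set i0 v = T.take i0 ++ [v] ++ N0.drop (i0+1) := by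
        intro v
        rw [List.set_append, if_neg (by rw [List.length_take]; omega), List.length_take,
          Nat.min_eq_left (by omega), Nat.sub_self, hdropN0, List.set_cons_zero,
          List.append_assoc, List.singleton_append]
      have htake : T.take (i0+1) = T.take i0 ++ [T[i0]'(by omega)] := by
        rw [List.take_add_one, List.getElem?_eq_getElem (by omega : i0 < T.length)]
        rfl
      by_cases hne : i0 = sc
      · subst hne
        rw [if_neg (by simp)]
        have hTi : T[i0]'(by omega) = c := by
          have h1 := hTget i0 (by omega)
          rw [List.getElem?_eq_getElem (by omega : i0 < T.length)] at h1
          rw [if_neg (by omega), if_pos rfl] at h1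
          exact Option.some_inj.mp h1
        rw [Prod.mk.injEq]
        constructor
        · split_ifs <;> push_cast <;> omega
        · rw [htake, hTi, hdropN0, if_pos rfl, List.append_assoc, List.singleton_append]
      · rw [if_pos (by simpa using hne)]
        have harg : ((if i0 ≤ sc then (i0:Int) - 1 else (i0:Int) - 2) + 1).toNat
            = if i0 < sc then i0 else i0 - 1 := by
          split_ifs <;> omega
        have hTi : T[i0]'(by omega) = m.getD (if i0 < sc then i0 else i0 - 1) 0 := by
          have h1 := hTget i0 (by omega)
          rw [List.getElem?_eq_getElem (by omega : i0 < T.length)] at h1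
          by_cases h2 : i0 < sc
          · rw [if_pos h2, List.getElem?_eq_getElem (by omega : i0 < m.length)] at h1
            rw [if_pos h2, List.getD_eq_getElem _ _ (by omega : i0 < m.length)]
            exact Option.some_inj.mp h1
          · rw [if_neg h2, if_neg hne,
              List.getElem?_eq_getElem (by omega : i0 - 1 < m.length)] at h1
            rw [if_neg h2, List.getD_eq_getElem _ _ (by omega : i0 - 1 < m.length)]
            exact Option.some_inj.mp h1
        rw [Prod.mk.injEq]
        constructor
        · simp only
          split_ifs <;> push_cast <;> omega
        · simp only [harg, hsetstep, htake, hTi]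
  have hfin := haux n le_rfl
  rw [hfin]
  simp only
  rw [List.take_of_length_le (by omega), List.drop_of_length_le (by omega), List.append_nil]

lemma main_eq (k V : Int) (hpre : k ≤ 1 ∨ 1 ≤ V) : kDecompose k V = kDecompose_alt k V := by
  by_cases hk : k ≤ 1
  · rw [kDecompose, kDecompose_alt, if_pos hk]
    have h0 : kdLoop k V.toNat (k.toNat + 1) 0 1 (List.replicate V.toNat 0)
        = (0, 1, List.replicate V.toNat 0) := by
      rw [kdLoop, if_neg (by omega)]
    rw [h0]
    simp
  · have hk2 : 2 ≤ k := by omega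
    have hV : 1 ≤ V := by tauto
    set n := V.toNat with hn'
    have hn : n ≠ 0 := by omega
    -- A's category loop
    obtain ⟨c, vals, heq, hge, hub, hlw, hg, hbase, hl⟩ :=
      kdLoop_spec k n hn (k.toNat + 1) 0 (List.replicate n 0) le_rfl (by simp)
        (by intro c' h1 h2; omega) (by omega)
    have heq' : kdLoop k n (k.toNat + 1) 0 1 (List.replicate n 0) = (c, (c+1)^n, vals) := by
      rw [show ((0:Int)+1)^n = 1 by norm_num] at heq
      exact heq
    have hc1 : 1 ≤ c := by
      by_contra h
      have : c = 0 := by omega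
      subst this
      norm_num at hub
      omega
    have hvals : vals = geomVals c n := hg (by omega)
    -- B's binary search finds the same category
    have hbs := bsearchC_spec k n k.toNat 1 (k-1) le_rfl (by omega)
      (by intro c' h1 h2; omega)
      (by rw [show k - 1 + 1 = k by ring]; exact le_self_pow₀ (by omega) hn)
      (by omega)
    have hcB : bsearchC k n k.toNat 1 (k-1) = c := by
      obtain ⟨b1, b2, b3⟩ := hbs
      rcases lt_trichotomy (bsearchC k n k.toNat 1 (k-1)) c with h | h | h
      · have := hlw _ (by omega) h; omega
      · exact h
      · have := b3 c hc1 h; omega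
    -- shared subcategory scan
    have hscan : kdScLoop k vals (n-1) ((c+1)^n) = scanSc k c n (n-1) ((c+1)^n) := by
      rw [hvals]
      exact scLoop_eq k c n (n-1) (by omega) _
    set s := scanSc k c n (n-1) ((c+1)^n) with hs
    have hsc : s.1 ≤ n - 1 := scanSc_fst_le k c n (n-1) _
    set j := k - s.2 - 1 with hj
    set mx := List.replicate s.1 (c-1) ++ List.replicate ((n-1) - s.1) c with hmx
    have hmxlen : mx.length = n - 1 := by rw [hmx]; simp; omega
    have hmxpos : ∀ x ∈ mx, 0 ≤ x := by
      intro x hx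
      rcases List.mem_append.mp hx with h | h <;>
        · have := List.eq_of_mem_replicate h; omega
    -- the digit list both sides produce
    set dl := (List.range (n-1)).map (dgt j mx) with hdl
    have hA_digits : decompose_j j mx = dl := by
      rw [decompose_j_spec j mx hmxpos, hmxlen]
    have hB_digits : (digLoop c s.1 (n-1) j []).reverse = dl := by
      have h1 : j / sufP mx (n-1) = j := by
        rw [← hmxlen, sufP_length, Int.ediv_one]
      have h2 := digLoop_spec j c hc1 n s.1 hsc hn (n-1) le_rfl []
      rw [← hmx, h1] at h2
      rw [h2, List.nil_append, ← List.map_reverse, List.reverse_reverse]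
    -- assemble
    rw [kDecompose, kDecompose_alt, if_neg hk]
    simp only [← hn', heq', hcB, hscan, ← hs]
    rw [if_neg (by omega : ¬ c = 0)]
    simp only [mxFold c (n-1) s.1 hsc, ← hmx, ← hj, hA_digits, hB_digits]
    exact fill_spec dl c n s.1 (by omega) (by rw [hdl]; simp)

-- ===== VERDICT (by name: the statement is the Claim_ definition above) =====
theorem kDecompose_spec : Claim_equal_kDecompose := by
  intro k V _ hpre
  unfold Spec_kDecompose
  exact main_eq k V hpre
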